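-- pv_equiv track=rewrite | github.com/mortyc126-debug/SHA-256 | exp47_carry_freedom.py | count_carry_freedom_single_addition
-- ===== SOURCE A (Python) =====
-- def count_carry_freedom_single_addition(a, b):
--     """
--     For one addition a+b, count P/G/K positions.
--     P = free carry, G/K = determined carry.
--     """
--     p = 0; g = 0; k = 0
--     for i in range(32):
--         ai = (a >> i) & 1
--         bi = (b >> i) & 1
--         if ai == 1 and bi == 1:
--             g += 1
--         elif ai == 0 and bi == 0:
--             k += 1
--         else:
--             p += 1
--     return p, g, k
-- ===== SOURCE B (Python) =====
-- def count_carry_freedom_single_addition(a, b):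
--     """
--     For one addition a+b, count P/G/K positions.
--     P = free carry, G/K = determined carry.
--     Whole-word bitwise version: G positions are the set bits of a&b,
--     P positions the set bits of a^b, K the rest of the 32 positions.
--     """
--     g = bin((a & b) & 0xFFFFFFFF).count("1")
--     p = bin((a ^ b) & 0xFFFFFFFF).count("1")
--     return p, g, 32 - g - p
-- ===== Notes on version B (the rewrite author's own statement) =====
-- stated objective: alternative
-- what changed: Replaces the 32-iteration per-bit loop with three whole-word bitwise operations: popcount of (a&b)&0xFFFFFFFF gives g, popcount of (a^b)&0xFFFFFFFF gives p, and k = 32 - g - p; the mask reproduces the loop's 32-position window including two's-complement bits of negative arguments.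
import Mathlib
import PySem

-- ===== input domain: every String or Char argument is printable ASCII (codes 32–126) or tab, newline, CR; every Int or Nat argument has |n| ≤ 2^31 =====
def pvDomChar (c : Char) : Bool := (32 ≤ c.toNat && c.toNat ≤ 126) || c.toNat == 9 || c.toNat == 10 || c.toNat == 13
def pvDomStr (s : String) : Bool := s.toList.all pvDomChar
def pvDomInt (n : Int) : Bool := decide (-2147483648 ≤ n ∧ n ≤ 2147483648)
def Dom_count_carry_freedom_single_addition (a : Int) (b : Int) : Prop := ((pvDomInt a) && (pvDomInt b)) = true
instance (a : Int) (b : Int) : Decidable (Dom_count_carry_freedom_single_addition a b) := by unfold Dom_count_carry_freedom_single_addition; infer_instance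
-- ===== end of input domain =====

-- B replaces A's 32-iteration per-bit loop by whole-word popcounts of (a&b) and (a^b)
-- masked to 32 bits (objective: alternative word-level algorithm, same result).

-- ===== PORT A =====
def count_carry_freedom_single_addition (a : Int) (b : Int) : Int × Int × Int :=
  (PySem.List.pyRange 0 32 1).foldl
    (fun (s : Int × Int × Int) (i : Int) =>
      let ai : Int := PySem.Int.band (a >>> i.toNat) 1
      let bi : Int := PySem.Int.band (b >>> i.toNat) 1
      if ai = 1 ∧ bi = 1 then (s.1, s.2.1 + 1, s.2.2)
      else if ai = 0 ∧ bi = 0 then (s.1, s.2.1, s.2.2 + 1)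
      else (s.1 + 1, s.2.1, s.2.2))
    (0, 0, 0)

-- ===== PORT B =====
-- bin(x).count("1") on the nonnegative masked word is its popcount = PySem.Int.bitCount.
def count_carry_freedom_single_addition_alt (a : Int) (b : Int) : Int × Int × Int :=
  let g : Int := (PySem.Int.bitCount (PySem.Int.band (PySem.Int.band a b) 4294967295) : Int)
  let p : Int := (PySem.Int.bitCount (PySem.Int.band (PySem.Int.bxor a b) 4294967295) : Int)
  (p, g, 32 - g - p)

-- ===== PRECONDITION & SPEC =====
def Spec_count_carry_freedom_single_addition (a : Int) (b : Int) (out : Int × Int × Int) : Prop := out = count_carry_freedom_single_addition_alt a b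
instance (a : Int) (b : Int) (out : Int × Int × Int) : Decidable (Spec_count_carry_freedom_single_addition a b out) := by unfold Spec_count_carry_freedom_single_addition; infer_instance

-- ===== CLAIM (what is proved, stated in full; the proofs are below) =====
def Claim_equal_count_carry_freedom_single_addition : Prop := ∀ (a : Int) (b : Int), Dom_count_carry_freedom_single_addition a b → Spec_count_carry_freedom_single_addition a b (count_carry_freedom_single_addition a b)

-- ===== LEMMAS AND PROOFS =====

-- m - (m &&& n) is the bitwise difference of m and n
theorem pvNatSubAnd (m : Nat) : ∀ n : Nat, m - (m &&& n) = m.ldiff n := by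
  induction m using Nat.binaryRec with
  | zero =>
    intro n
    have h0 : Nat.ldiff 0 n = 0 := Nat.eq_of_testBit_eq fun i => by simp [Nat.testBit_ldiff]
    simp [h0]
  | bit a m ih =>
    intro n
    induction n using Nat.bitCasesOn with
    | bit b n =>
      rw [Nat.land_bit, Nat.ldiff_bit, ← ih n]
      have h : m &&& n ≤ m := Nat.and_le_left
      cases a <;> cases b <;> simp [Nat.bit_val] <;> omega

theorem pvNatCastTestBit (n : Nat) (i : Nat) : (↑n : Int).testBit i = n.testBit i := rfl

theorem pvNegSuccSub (n : Nat) : (-(Int.negSucc n) - 1).toNat = n := by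
  simp [Int.negSucc_eq]

theorem pvNegOfNat (k : Nat) : -(↑k : Int) - 1 = Int.negSucc k := by
  rw [Int.negSucc_eq]; ring

theorem pvBandTestBit (a b : Int) (i : Nat) :
    (PySem.Int.band a b).testBit i = (a.testBit i && b.testBit i) := by
  cases a with
  | ofNat m =>
    cases b with
    | ofNat n =>
      show (PySem.Int.band (↑m) (↑n)).testBit i = _
      rw [PySem.Int.band_of_nonneg (Int.natCast_nonneg m) (Int.natCast_nonneg n)]
      simp [pvNatCastTestBit]
    | negSucc n =>
      have ha : (0:Int) ≤ Int.ofNat m := Int.natCast_nonneg m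
      have hb : ¬ (0:Int) ≤ Int.negSucc n := not_le.mpr (Int.negSucc_lt_zero n)
      simp only [PySem.Int.band, if_pos ha, if_neg hb, pvNegSuccSub]
      rw [show (Int.ofNat m).toNat = m from rfl, pvNatSubAnd]
      rw [show ((↑(m.ldiff n) : Int)).testBit i = (m.ldiff n).testBit i from rfl]
      rw [Nat.testBit_ldiff]
      rfl
  | negSucc m =>
    cases b with
    | ofNat n =>
      have ha : ¬ (0:Int) ≤ Int.negSucc m := not_le.mpr (Int.negSucc_lt_zero m)
      have hb : (0:Int) ≤ Int.ofNat n := Int.natCast_nonneg n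
      simp only [PySem.Int.band, if_pos hb, if_neg ha, pvNegSuccSub]
      rw [show (Int.ofNat n).toNat = n from rfl, pvNatSubAnd]
      rw [show ((↑(n.ldiff m) : Int)).testBit i = (n.ldiff m).testBit i from rfl]
      rw [Nat.testBit_ldiff]
      show _ = ((!m.testBit i) && n.testBit i)
      cases m.testBit i <;> cases n.testBit i <;> rfl
    | negSucc n =>
      have ha : ¬ (0:Int) ≤ Int.negSucc m := not_le.mpr (Int.negSucc_lt_zero m)
      have hb : ¬ (0:Int) ≤ Int.negSucc n := not_le.mpr (Int.negSucc_lt_zero n)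
      simp only [PySem.Int.band, if_neg ha, if_neg hb, pvNegSuccSub, pvNegOfNat]
      rw [show (Int.negSucc (m ||| n)).testBit i = !((m ||| n).testBit i) from rfl]
      rw [Nat.testBit_or]
      show _ = ((!m.testBit i) && (!n.testBit i))
      cases m.testBit i <;> cases n.testBit i <;> rfl

theorem pvBxorTestBit (a b : Int) (i : Nat) :
    (PySem.Int.bxor a b).testBit i = (a.testBit i ^^ b.testBit i) := by
  cases a with
  | ofNat m =>
    cases b with
    | ofNat n =>
      have ha : (0:Int) ≤ Int.ofNat m := Int.natCast_nonneg m
      have hb : (0:Int) ≤ Int.ofNat n := Int.natCast_nonneg n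
      simp only [PySem.Int.bxor, if_pos ha, if_pos hb]
      rw [show ((↑((Int.ofNat m).toNat ^^^ (Int.ofNat n).toNat) : Int)).testBit i
            = (m ^^^ n).testBit i from rfl]
      rw [Nat.testBit_xor]; rfl
    | negSucc n =>
      have ha : (0:Int) ≤ Int.ofNat m := Int.natCast_nonneg m
      have hb : ¬ (0:Int) ≤ Int.negSucc n := not_le.mpr (Int.negSucc_lt_zero n)
      simp only [PySem.Int.bxor, if_pos ha, if_neg hb, pvNegSuccSub, pvNegOfNat]
      rw [show (Int.negSucc ((Int.ofNat m).toNat ^^^ n)).testBit i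
            = !((m ^^^ n).testBit i) from rfl]
      rw [Nat.testBit_xor]
      show _ = (m.testBit i ^^ !n.testBit i)
      cases m.testBit i <;> cases n.testBit i <;> rfl
  | negSucc m =>
    cases b with
    | ofNat n =>
      have ha : ¬ (0:Int) ≤ Int.negSucc m := not_le.mpr (Int.negSucc_lt_zero m)
      have hb : (0:Int) ≤ Int.ofNat n := Int.natCast_nonneg n
      simp only [PySem.Int.bxor, if_pos hb, if_neg ha, pvNegSuccSub, pvNegOfNat]
      rw [show (Int.negSucc (m ^^^ (Int.ofNat n).toNat)).testBit i
            = !((m ^^^ n).testBit i) from rfl]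
      rw [Nat.testBit_xor]
      show _ = ((!m.testBit i) ^^ n.testBit i)
      cases m.testBit i <;> cases n.testBit i <;> rfl
    | negSucc n =>
      have ha : ¬ (0:Int) ≤ Int.negSucc m := not_le.mpr (Int.negSucc_lt_zero m)
      have hb : ¬ (0:Int) ≤ Int.negSucc n := not_le.mpr (Int.negSucc_lt_zero n)
      simp only [PySem.Int.bxor, if_neg ha, if_neg hb, pvNegSuccSub]
      rw [show ((↑(m ^^^ n) : Int)).testBit i = (m ^^^ n).testBit i from rfl]
      rw [Nat.testBit_xor]
      show _ = ((!m.testBit i) ^^ (!n.testBit i))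
      cases m.testBit i <;> cases n.testBit i <;> rfl

theorem pvTestBitMod2 (m i : Nat) : m.testBit i = decide ((m >>> i) % 2 = 1) := by
  simp [Nat.testBit, Nat.and_comm 1, Nat.and_one_is_mod]

theorem pvBandOneBit (x : Int) (i : Nat) :
    PySem.Int.band (x >>> i) 1 = if x.testBit i then (1 : Int) else 0 := by
  cases x with
  | ofNat m =>
    rw [show (Int.ofNat m) >>> i = (↑(m >>> i) : Int) from rfl]
    rw [show (1 : Int) = ((1 : Nat) : Int) from rfl]
    rw [PySem.Int.band_of_nonneg (Int.natCast_nonneg _) (Int.natCast_nonneg _)]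
    rw [show ((↑(m >>> i) : Int)).toNat = m >>> i from rfl,
        show ((↑(1:Nat) : Int)).toNat = 1 from rfl, Nat.and_one_is_mod]
    rw [show (Int.ofNat m).testBit i = m.testBit i from rfl, pvTestBitMod2]
    by_cases h : (m >>> i) % 2 = 1
    · simp [h]
    · have h0 : (m >>> i) % 2 = 0 := by omega
      simp [h0]
  | negSucc m =>
    rw [show (Int.negSucc m) >>> i = Int.negSucc (m >>> i) from rfl]
    have ha : ¬ (0:Int) ≤ Int.negSucc (m >>> i) := not_le.mpr (Int.negSucc_lt_zero _)
    have hb : (0:Int) ≤ 1 := by norm_num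
    simp only [PySem.Int.band, if_neg ha, if_pos hb, pvNegSuccSub]
    rw [show ((1:Int)).toNat = 1 from rfl]
    rw [show (1 &&& (m >>> i)) = (m >>> i) &&& 1 from Nat.and_comm _ _, Nat.and_one_is_mod]
    rw [show (Int.negSucc m).testBit i = !(m.testBit i) from rfl, pvTestBitMod2]
    by_cases h : (m >>> i) % 2 = 1
    · simp [h]
    · have h0 : (m >>> i) % 2 = 0 := by omega
      simp [h0]

theorem pvPopcount : ∀ (k m : Nat), m < 2 ^ k →
    PySem.Int.bitCount (m : Int) = (List.range k).countP (fun i => m.testBit i) := by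
  intro k
  induction k with
  | zero =>
    intro m hm
    have : m = 0 := by simpa using hm
    subst this
    simp [PySem.Int.bitCount_natCast_zero]
  | succ k ih =>
    intro m hm
    rcases Nat.eq_zero_or_pos m with h0 | hpos
    · subst h0
      simp [PySem.Int.bitCount_natCast_zero, Nat.zero_testBit]
    · rw [PySem.Int.bitCount_natCast hpos, List.range_succ_eq_map, List.countP_cons,
          List.countP_map]
      have hd : m / 2 < 2 ^ k := by rw [Nat.pow_succ] at hm; omega
      rw [ih (m / 2) hd]
      have hcg : (List.range k).countP (fun i => (m / 2).testBit i)
          = (List.range k).countP ((fun i => m.testBit i) ∘ Nat.succ) := by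
        apply List.countP_congr
        intro x _
        simp [Function.comp, Nat.succ_eq_add_one, Nat.testBit_add_one]
      rw [← hcg]
      have ht0 : m.testBit 0 = decide (m % 2 = 1) := Nat.testBit_zero m
      by_cases h2 : m % 2 = 1
      · simp [ht0, h2]; omega
      · have h0 : m % 2 = 0 := by omega
        simp [ht0, h0]

theorem pvMaskWord (x : Int) :
    PySem.Int.bitCount (PySem.Int.band x 4294967295) =
      (List.range 32).countP (fun i => x.testBit i) := by
  have hmask : (4294967295 : Int) = ((2 ^ 32 - 1 : Nat) : Int) := by norm_num
  have hw : 0 ≤ PySem.Int.band x 4294967295 := by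
    rw [PySem.Int.band_comm]
    exact PySem.Int.band_nonneg_of_nonneg_left x (by norm_num)
  have htb : ∀ i, (PySem.Int.band x 4294967295).toNat.testBit i
      = (x.testBit i && decide (i < 32)) := by
    intro i
    have h1 : ((PySem.Int.band x 4294967295).toNat : Int).testBit i
        = (PySem.Int.band x 4294967295).testBit i := by rw [Int.toNat_of_nonneg hw]
    rw [← pvNatCastTestBit, h1, pvBandTestBit]
    congr 1
    rw [hmask, pvNatCastTestBit, Nat.testBit_two_pow_sub_one]
  have hlt : (PySem.Int.band x 4294967295).toNat < 2 ^ 32 := by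
    have he : (PySem.Int.band x 4294967295).toNat
        = (PySem.Int.band x 4294967295).toNat % 2 ^ 32 := by
      apply Nat.eq_of_testBit_eq
      intro i
      rw [Nat.testBit_mod_two_pow]
      by_cases h : i < 32 <;> simp [h, htb]
    rw [he]
    exact Nat.mod_lt _ (by norm_num)
  have h2 : PySem.Int.bitCount (PySem.Int.band x 4294967295)
      = PySem.Int.bitCount (((PySem.Int.band x 4294967295).toNat : Nat) : Int) := by
    rw [Int.toNat_of_nonneg hw]
  rw [h2, pvPopcount 32 _ hlt]
  apply List.countP_congr
  intro i hi
  rw [htb i]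
  simp [List.mem_range.mp hi]

-- the loop body of port A, named for the proofs (definitionally equal to the inline lambda)
def pvStep (a b : Int) : Int × Int × Int → Int → Int × Int × Int :=
  fun (s : Int × Int × Int) (i : Int) =>
    let ai : Int := PySem.Int.band (a >>> i.toNat) 1
    let bi : Int := PySem.Int.band (b >>> i.toNat) 1
    if ai = 1 ∧ bi = 1 then (s.1, s.2.1 + 1, s.2.2)
    else if ai = 0 ∧ bi = 0 then (s.1, s.2.1, s.2.2 + 1)
    else (s.1 + 1, s.2.1, s.2.2)

theorem pvStepEval (a b p g k : Int) (i : Int) :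
    pvStep a b (p, g, k) i =
      if a.testBit i.toNat && b.testBit i.toNat then (p, g + 1, k)
      else if !a.testBit i.toNat && !b.testBit i.toNat then (p, g, k + 1)
      else (p + 1, g, k) := by
  unfold pvStep
  simp only [pvBandOneBit]
  by_cases hx : a.testBit i.toNat <;> by_cases hy : b.testBit i.toNat <;> simp [hx, hy]

theorem pvFoldCount (a b : Int) : ∀ (l : List Int) (p g k : Int),
    l.foldl (pvStep a b) (p, g, k) =
      (p + ↑(l.countP fun i => a.testBit i.toNat ^^ b.testBit i.toNat),
       g + ↑(l.countP fun i => a.testBit i.toNat && b.testBit i.toNat),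
       k + ↑(l.countP fun i => !a.testBit i.toNat && !b.testBit i.toNat)) := by
  intro l
  induction l with
  | nil => intro p g k; simp
  | cons i l ih =>
    intro p g k
    rw [List.foldl_cons, pvStepEval]
    by_cases hx : a.testBit i.toNat <;> by_cases hy : b.testBit i.toNat <;>
      simp only [hx, hy, Bool.true_and, Bool.false_and, Bool.not_true, Bool.not_false,
        Bool.and_true, Bool.and_false, if_true, if_false, Bool.xor_true, Bool.xor_false,
        ite_true, ite_false] <;>
      rw [ih] <;>
      simp [hx, hy, Prod.mk.injEq] <;>
      omega

theorem pvPartition (a b : Int) (l : List Nat) :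
    (l.countP fun i => a.testBit i ^^ b.testBit i) +
      (l.countP fun i => a.testBit i && b.testBit i) +
      (l.countP fun i => !a.testBit i && !b.testBit i) = l.length := by
  induction l with
  | nil => simp
  | cons i l ih =>
    simp only [List.countP_cons, List.length_cons]
    cases a.testBit i <;> cases b.testBit i <;> simp <;> omega

-- ===== VERDICT (by name: the statement is the Claim_ definition above) =====
theorem count_carry_freedom_single_addition_spec : Claim_equal_count_carry_freedom_single_addition := by
  intro a b _
  show (PySem.List.pyRange 0 32 1).foldl (pvStep a b) (0, 0, 0) =
    (((PySem.Int.bitCount (PySem.Int.band (PySem.Int.bxor a b) 4294967295) : Nat) : Int),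
     ((PySem.Int.bitCount (PySem.Int.band (PySem.Int.band a b) 4294967295) : Nat) : Int),
     32 - ((PySem.Int.bitCount (PySem.Int.band (PySem.Int.band a b) 4294967295) : Nat) : Int)
        - ((PySem.Int.bitCount (PySem.Int.band (PySem.Int.bxor a b) 4294967295) : Nat) : Int))
  rw [PySem.List.pyRange_one, show ((32 : Int) - 0).toNat = 32 from by decide,
    pvFoldCount a b]
  rw [pvMaskWord (PySem.Int.band a b), pvMaskWord (PySem.Int.bxor a b)]
  simp only [List.countP_map, Function.comp_def, zero_add, Int.toNat_natCast,
    pvBandTestBit, pvBxorTestBit]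
  have hpart := pvPartition a b (List.range 32)
  rw [List.length_range] at hpart
  simp only [Prod.mk.injEq]
  refine ⟨trivial, trivial, ?_⟩
  omega
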